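-- pv_equiv track=rewrite | github.com/kalsr/KNet | Fraud-Detector-V3.py | heuristic_analysis
-- ===== SOURCE A (Python) =====
-- def heuristic_analysis(logs):
--     score, flags = 0, []
--     for l in logs:
--         l_low = l.lower()
--         if "failed" in l_low: score += 5; flags.append(l)
--         if "unauthorized" in l_low: score += 7; flags.append(l)
--         if "invalid user" in l_low: score += 6; flags.append(l)
--         if "403" in l_low: score += 4; flags.append(l)
--         if "brute" in l_low: score += 10; flags.append(l)
--         if "suspicious" in l_low: score += 10; flags.append(l)
--     return score, list(dict.fromkeys(flags))
-- ===== SOURCE B (Python) =====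
-- # B: keyword-major pass computes the score from per-keyword match counts;
-- # flags come from a single filter-with-seen-set pass (no per-keyword appends,
-- # no post-hoc dedup of a duplicate-laden list). Same result, staged differently.
-- KEYWORDS = [
--     ("failed", 5),
--     ("unauthorized", 7),
--     ("invalid user", 6),
--     ("403", 4),
--     ("brute", 10),
--     ("suspicious", 10),
-- ]
--
-- def heuristic_analysis(logs):
--     lows = [l.lower() for l in logs]
--     score = sum(w for kw, w in KEYWORDS for low in lows if kw in low)
--     seen = set()
--     flags = []
--     for l, low in zip(logs, lows):
--         if l not in seen and any(kw in low for kw, _ in KEYWORDS):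
--             seen.add(l)
--             flags.append(l)
--     return score, flags
-- ===== Notes on version B (the rewrite author's own statement) =====
-- stated objective: alternative
-- what changed: Score is computed keyword-major (per-keyword match counts over pre-lowered lines) instead of line-major branch chains, and flags are produced by one filter-with-seen-set pass over the lines instead of per-keyword appends followed by dict.fromkeys dedup.
import Mathlib
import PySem

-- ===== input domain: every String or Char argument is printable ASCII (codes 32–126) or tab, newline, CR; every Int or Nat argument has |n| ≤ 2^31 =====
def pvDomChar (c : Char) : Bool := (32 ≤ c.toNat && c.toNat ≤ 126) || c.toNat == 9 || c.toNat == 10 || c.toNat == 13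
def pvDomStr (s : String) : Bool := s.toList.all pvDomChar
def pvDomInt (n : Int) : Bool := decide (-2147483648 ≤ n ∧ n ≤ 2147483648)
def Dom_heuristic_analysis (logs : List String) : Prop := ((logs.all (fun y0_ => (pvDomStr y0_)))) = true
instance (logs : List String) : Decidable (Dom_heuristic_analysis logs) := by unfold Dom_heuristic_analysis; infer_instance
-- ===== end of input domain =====

-- B computes the score keyword-major from per-keyword match counts and the flags by one filter-with-seen-set pass (no per-keyword appends + dedup): an alternative staging, same cost.


-- ===== PORT A =====
def heuristic_analysis (logs : List String) : Int × List String :=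
  let r := logs.foldl (fun (acc : Int × List String) l =>
    let l_low := PySem.Str.lower l
    let acc := if PySem.Str.isIn "failed" l_low then (acc.1 + 5, acc.2 ++ [l]) else acc
    let acc := if PySem.Str.isIn "unauthorized" l_low then (acc.1 + 7, acc.2 ++ [l]) else acc
    let acc := if PySem.Str.isIn "invalid user" l_low then (acc.1 + 6, acc.2 ++ [l]) else acc
    let acc := if PySem.Str.isIn "403" l_low then (acc.1 + 4, acc.2 ++ [l]) else acc
    let acc := if PySem.Str.isIn "brute" l_low then (acc.1 + 10, acc.2 ++ [l]) else acc
    let acc := if PySem.Str.isIn "suspicious" l_low then (acc.1 + 10, acc.2 ++ [l]) else acc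
    acc) (0, [])
  (r.1, PySem.List.dedup r.2)

-- ===== PORT B =====
-- B's ordered (keyword, weight) table
def pvKeywords : List (String × Int) :=
  [("failed", 5), ("unauthorized", 7), ("invalid user", 6),
   ("403", 4), ("brute", 10), ("suspicious", 10)]

def heuristic_analysis_alt (logs : List String) : Int × List String :=
  let lows := logs.map PySem.Str.lower
  let score := pvKeywords.foldl (fun s kw =>
    lows.foldl (fun s low => if PySem.Str.isIn kw.1 low then s + kw.2 else s) s) 0
  let r := (logs.zip lows).foldl (fun (acc : List String × PySem.Set String) p =>
      if !(PySem.Set.contains acc.2 p.1) &&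
         pvKeywords.any (fun kw => PySem.Str.isIn kw.1 p.2)
      then (acc.1 ++ [p.1], PySem.Set.add acc.2 p.1) else acc)
    ([], PySem.Set.empty)
  (score, r.1)

-- ===== PRECONDITION & SPEC =====
def Spec_heuristic_analysis (logs : List String) (out : Int × List String) : Prop := out = heuristic_analysis_alt logs
instance (logs : List String) (out : Int × List String) : Decidable (Spec_heuristic_analysis logs out) := by unfold Spec_heuristic_analysis; infer_instance

-- ===== CLAIM (what is proved, stated in full; the proofs are below) =====
def Claim_equal_heuristic_analysis : Prop := ∀ (logs : List String), Dom_heuristic_analysis logs → Spec_heuristic_analysis logs (heuristic_analysis logs)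

-- ===== LEMMAS AND PROOFS =====

-- does line l (lowercased) match any keyword?
def pvHit (l : String) : Bool := pvKeywords.any (fun kw => PySem.Str.isIn kw.1 (PySem.Str.lower l))
-- total weight of line l
def pvW (l : String) : Int :=
  ((pvKeywords.filter (fun kw => PySem.Str.isIn kw.1 (PySem.Str.lower l))).map (·.2)).sum
-- the flags A appends for line l (one copy of l per matching keyword)
def pvPer (l : String) : List String :=
  (pvKeywords.filter (fun kw => PySem.Str.isIn kw.1 (PySem.Str.lower l))).map (fun _ => l)
-- A's loop body, named (definitionally equal to the lambda in the port of A)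
def pvStepA (acc : Int × List String) (l : String) : Int × List String :=
  let l_low := PySem.Str.lower l
  let acc := if PySem.Str.isIn "failed" l_low then (acc.1 + 5, acc.2 ++ [l]) else acc
  let acc := if PySem.Str.isIn "unauthorized" l_low then (acc.1 + 7, acc.2 ++ [l]) else acc
  let acc := if PySem.Str.isIn "invalid user" l_low then (acc.1 + 6, acc.2 ++ [l]) else acc
  let acc := if PySem.Str.isIn "403" l_low then (acc.1 + 4, acc.2 ++ [l]) else acc
  let acc := if PySem.Str.isIn "brute" l_low then (acc.1 + 10, acc.2 ++ [l]) else acc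
  let acc := if PySem.Str.isIn "suspicious" l_low then (acc.1 + 10, acc.2 ++ [l]) else acc
  acc

theorem pvStepA_eq (acc : Int × List String) (l : String) :
    pvStepA acc l = (acc.1 + pvW l, acc.2 ++ pvPer l) := by
  simp only [pvStepA, pvW, pvPer, pvKeywords, List.filter_cons, List.filter_nil]
  split_ifs <;> simp_all <;> ring

theorem pvFoldA_eq (logs : List String) (acc : Int × List String) :
    logs.foldl pvStepA acc = (acc.1 + (logs.map pvW).sum, acc.2 ++ logs.flatMap pvPer) := by
  induction logs generalizing acc with
  | nil => simp
  | cons a t ih =>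
    simp only [List.foldl, List.map, List.sum_cons, List.flatMap_cons]
    rw [pvStepA_eq, ih]
    simp [add_assoc]

theorem pvPer_fold (s : PySem.Set String) (l : String) :
    (pvPer l).foldl PySem.Set.add s = if pvHit l then PySem.Set.add s l else s := by
  simp only [pvPer, pvHit, pvKeywords, List.filter_cons, List.filter_nil,
    List.any_cons, List.any_nil]
  split_ifs <;> simp_all [List.foldl]

theorem pvW_eq (l : String) :
    pvW l =
      (if PySem.Str.isIn "failed" (PySem.Str.lower l) then (5:Int) else 0) +
      (if PySem.Str.isIn "unauthorized" (PySem.Str.lower l) then (7:Int) else 0) +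
      (if PySem.Str.isIn "invalid user" (PySem.Str.lower l) then (6:Int) else 0) +
      (if PySem.Str.isIn "403" (PySem.Str.lower l) then (4:Int) else 0) +
      (if PySem.Str.isIn "brute" (PySem.Str.lower l) then (10:Int) else 0) +
      (if PySem.Str.isIn "suspicious" (PySem.Str.lower l) then (10:Int) else 0) := by
  simp only [pvW, pvKeywords, List.filter_cons, List.filter_nil]
  split_ifs <;> simp_all

theorem pv_foldl_if_add (lows : List String) (kw : String) (w s : Int) :
    lows.foldl (fun s low => if PySem.Str.isIn kw low then s + w else s) s
      = s + w * (lows.countP (fun low => PySem.Str.isIn kw low) : Int) := by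
  induction lows generalizing s with
  | nil => simp
  | cons a t ih =>
    simp only [List.foldl, List.countP_cons]
    split_ifs <;> rw [ih] <;> simp_all <;> ring

theorem pv_sum_map_pvW (logs : List String) :
    (logs.map pvW).sum =
      5 * (logs.countP (fun l => PySem.Str.isIn "failed" (PySem.Str.lower l)) : Int) +
      7 * (logs.countP (fun l => PySem.Str.isIn "unauthorized" (PySem.Str.lower l)) : Int) +
      6 * (logs.countP (fun l => PySem.Str.isIn "invalid user" (PySem.Str.lower l)) : Int) +
      4 * (logs.countP (fun l => PySem.Str.isIn "403" (PySem.Str.lower l)) : Int) +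
      10 * (logs.countP (fun l => PySem.Str.isIn "brute" (PySem.Str.lower l)) : Int) +
      10 * (logs.countP (fun l => PySem.Str.isIn "suspicious" (PySem.Str.lower l)) : Int) := by
  induction logs with
  | nil => simp
  | cons a t ih =>
    simp only [List.map, List.sum_cons, List.countP_cons, ih, pvW_eq]
    split_ifs <;> push_cast <;> ring

-- B's two fold steps, named (definitionally equal to the lambdas in the port of B)
def pvStepB (acc : List String × PySem.Set String) (l : String) : List String × PySem.Set String :=
  if !(PySem.Set.contains acc.2 l) && pvHit l
  then (acc.1 ++ [l], PySem.Set.add acc.2 l) else acc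

def pvStepBPair (acc : List String × PySem.Set String) (p : String × String) : List String × PySem.Set String :=
  if !(PySem.Set.contains acc.2 p.1) && pvKeywords.any (fun kw => PySem.Str.isIn kw.1 p.2)
  then (acc.1 ++ [p.1], PySem.Set.add acc.2 p.1) else acc

def pvStepB' (s : PySem.Set String) (l : String) : PySem.Set String :=
  if pvHit l then PySem.Set.add s l else s

theorem pvFoldB_eq (logs : List String) (s : List String) :
    logs.foldl pvStepB (s, s) = (logs.foldl pvStepB' s, logs.foldl pvStepB' s) := by
  induction logs generalizing s with
  | nil => simp
  | cons a t ih =>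
    simp only [List.foldl_cons]
    by_cases hmem : a ∈ s
    · have h1 : pvStepB (s, s) a = (s, s) := by
        simp [pvStepB, hmem]
      have h2 : pvStepB' s a = s := by
        by_cases hh : pvHit a <;> simp [pvStepB', hh, PySem.Set.add_of_mem hmem]
      rw [h1, h2, ih]
    · by_cases hh : pvHit a
      · have h1 : pvStepB (s, s) a = (s ++ [a], s ++ [a]) := by
          simp [pvStepB, hmem, hh]
        have h2 : pvStepB' s a = s ++ [a] := by
          simp [pvStepB', hh, PySem.Set.add_of_not_mem hmem]
        rw [h1, h2, ih]
      · have h1 : pvStepB (s, s) a = (s, s) := by simp [pvStepB, hh]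
        have h2 : pvStepB' s a = s := by simp [pvStepB', hh]
        rw [h1, h2, ih]

-- ===== VERDICT (by name: the statement is the Claim_ definition above) =====
theorem heuristic_analysis_spec : Claim_equal_heuristic_analysis := by
  intro logs _
  unfold Spec_heuristic_analysis
  show heuristic_analysis logs = heuristic_analysis_alt logs
  have hA : heuristic_analysis logs
      = ((logs.map pvW).sum, PySem.List.dedup (logs.flatMap pvPer)) := by
    unfold heuristic_analysis
    have h := pvFoldA_eq logs (0, [])
    rw [show logs.foldl (fun (acc : Int × List String) l =>
      let l_low := PySem.Str.lower l
      let acc := if PySem.Str.isIn "failed" l_low then (acc.1 + 5, acc.2 ++ [l]) else acc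
      let acc := if PySem.Str.isIn "unauthorized" l_low then (acc.1 + 7, acc.2 ++ [l]) else acc
      let acc := if PySem.Str.isIn "invalid user" l_low then (acc.1 + 6, acc.2 ++ [l]) else acc
      let acc := if PySem.Str.isIn "403" l_low then (acc.1 + 4, acc.2 ++ [l]) else acc
      let acc := if PySem.Str.isIn "brute" l_low then (acc.1 + 10, acc.2 ++ [l]) else acc
      let acc := if PySem.Str.isIn "suspicious" l_low then (acc.1 + 10, acc.2 ++ [l]) else acc
      acc) ((0 : Int), ([] : List String)) = logs.foldl pvStepA (0, []) from rfl, h]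
    simp
  rw [hA]
  unfold heuristic_analysis_alt
  show ((logs.map pvW).sum, PySem.List.dedup (logs.flatMap pvPer)) =
    (pvKeywords.foldl (fun s kw => (logs.map PySem.Str.lower).foldl
        (fun s low => if PySem.Str.isIn kw.1 low then s + kw.2 else s) s) 0,
     ((logs.zip (logs.map PySem.Str.lower)).foldl pvStepBPair ([], [])).1)
  rw [← List.map_prod_left_eq_zip, List.foldl_map]
  simp only [Prod.mk.injEq]
  constructor
  · -- score: unfold the six-keyword fold into per-keyword counts and compare
    rw [pv_sum_map_pvW]
    simp only [pvKeywords, List.foldl_cons, List.foldl_nil, pv_foldl_if_add]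
    simp only [List.countP_map, Function.comp_def]
    ring
  · -- flags: collapse B's zip fold, then relate A's dedup-after-flatMap to it
    show PySem.List.dedup (logs.flatMap pvPer) = (logs.foldl pvStepB ([], [])).1
    rw [pvFoldB_eq logs []]
    show PySem.List.dedup (logs.flatMap pvPer) = logs.foldl pvStepB' []
    rw [show PySem.List.dedup (logs.flatMap pvPer)
        = (logs.flatMap pvPer).foldl PySem.Set.add [] from rfl]
    rw [List.foldl_flatMap]
    congr 1
    funext s l
    rw [pvPer_fold s l]
    rfl
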